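-- pv_equiv track=rewrite | github.com/kvignesf/ezapi-miner | api_designer/utils/common.py | get_common_word
-- ===== SOURCE A (Python) =====
-- from itertools import groupby
--
-- def get_common_word(items):
--     common = None
--     nw = len(items)
--
--     if nw < 3:
--         return None
--
--     counter = {x: len(list(freq)) for x, freq in groupby(sorted(items))}
--
--     for k, v in counter.items():
--         if v >= 0.7 * nw and len(k) <= 3:  # prefix suffix max length = 3
--             common = k
--             break
--
--     return common
-- ===== SOURCE B (Python) =====
-- def get_common_word(items):
--     nw = len(items)
--     if nw < 3:
--         return None
--
--     counts = {}
--     for x in items: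
--         counts[x] = counts.get(x, 0) + 1
--
--     candidates = [k for k, v in counts.items() if len(k) <= 3 and v >= 0.7 * nw]
--     return min(candidates) if candidates else None
-- ===== Notes on version B (the rewrite author's own statement) =====
-- stated objective: faster
-- what changed: Replaces A's sort + itertools.groupby + ordered scan with an early break by a single hash-counting pass and a direct min over the qualifying short keys (no sorting at all).
import Mathlib
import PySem

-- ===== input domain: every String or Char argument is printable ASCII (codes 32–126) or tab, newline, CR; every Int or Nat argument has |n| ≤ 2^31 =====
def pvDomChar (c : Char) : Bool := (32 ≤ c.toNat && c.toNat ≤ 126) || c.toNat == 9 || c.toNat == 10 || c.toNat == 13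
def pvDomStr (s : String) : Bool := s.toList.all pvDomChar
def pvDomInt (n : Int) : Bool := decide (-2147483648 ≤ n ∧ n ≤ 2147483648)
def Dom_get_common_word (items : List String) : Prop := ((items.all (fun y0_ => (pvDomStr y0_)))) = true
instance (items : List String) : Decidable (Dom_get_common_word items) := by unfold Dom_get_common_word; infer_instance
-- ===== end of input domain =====

-- B replaces A's sort + groupby + ordered scan-with-break by a single counting pass and a direct
-- min over the qualifying short keys (objective: faster — no sort).
-- Both ports render the float test `v >= 0.7*nw` as `10*v ≥ 7*nw`; this is exact here (the float
-- rounding error is far below the 0.1 gap between 0.7*nw and the nearest other integer).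

-- ===== PORT A =====
-- groupby(sorted(items)): consecutive runs of equal elements of the sorted list, as (key, run length)
def pvGroups : List String → List (String × Int)
  | [] => []
  | x :: t =>
    (x, (1 + (t.takeWhile (· == x)).length : Int)) :: pvGroups (t.dropWhile (· == x))
termination_by l => l.length
decreasing_by
  exact Nat.lt_succ_of_le (List.length_dropWhile_le _ t)

-- the `for k, v in counter.items(): if …: common = k; break` loop
def pvFirst (nw : Int) : List (String × Int) → Option String
  | [] => none
  | (k, v) :: t => if 10 * v ≥ 7 * nw ∧ PySem.Str.len k ≤ 3 then some k else pvFirst nw t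

def get_common_word (items : List String) : Option String :=
  let nw : Int := items.length
  if nw < 3 then none
  else pvFirst nw (pvGroups (PySem.List.sorted items (fun x => x) false))

-- ===== PORT B =====
def get_common_word_alt (items : List String) : Option String :=
  let nw : Int := items.length
  if nw < 3 then none
  else
    let counts := items.foldl (fun d x => d.insert x (d.getD x 0 + 1)) (PySem.Dict.empty : PySem.Dict String Int)
    let candidates := (counts.items.filter (fun kv => PySem.Str.len kv.1 ≤ 3 && 10 * kv.2 ≥ 7 * nw)).map (·.1)
    PySem.List.min? candidates (fun x => x)

-- ===== PRECONDITION & SPEC =====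
def Spec_get_common_word (items : List String) (out : Option String) : Prop := out = get_common_word_alt items
instance (items : List String) (out : Option String) : Decidable (Spec_get_common_word items out) := by unfold Spec_get_common_word; infer_instance

-- ===== CLAIM (what is proved, stated in full; the proofs are below) =====
def Claim_equal_get_common_word : Prop := ∀ (items : List String), Dom_get_common_word items → Spec_get_common_word items (get_common_word items)

-- ===== LEMMAS AND PROOFS =====

-- the qualifying predicate both programs test, with the count taken in the full list
def pvP (items : List String) (nw : Int) (k : String) : Prop :=
  10 * (items.count k : Int) ≥ 7 * nw ∧ PySem.Str.len k ≤ 3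

-- in a sorted list x :: t, everything surviving dropWhile (== x) is strictly greater than x
theorem pv_dropWhile_gt (x : String) (t : List String) (hs : (x :: t).Pairwise (· ≤ ·)) :
    ∀ y ∈ t.dropWhile (· == x), x < y := by
  induction t with
  | nil => simp
  | cons a t' ih =>
    by_cases hax : a = x
    · subst hax
      intro y hy
      rw [List.dropWhile_cons_of_pos (by simp)] at hy
      exact ih (by
        rcases List.pairwise_cons.mp hs with ⟨h1, h2⟩
        rcases List.pairwise_cons.mp h2 with ⟨h3, h4⟩
        exact List.pairwise_cons.mpr ⟨h3, h4⟩) y hy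
    · intro y hy
      rw [List.dropWhile_cons_of_neg (by simp [hax])] at hy
      rcases List.pairwise_cons.mp hs with ⟨h1, h2⟩
      have hxa : x < a := lt_of_le_of_ne (h1 a (by simp)) (Ne.symm hax)
      rcases List.mem_cons.mp hy with rfl | hy'
      · exact hxa
      · exact lt_of_lt_of_le hxa ((List.pairwise_cons.mp h2).1 y hy')

-- in a sorted list, the head's run length is its full count
theorem pv_count_head_sorted (x : String) (t : List String) (hs : (x :: t).Pairwise (· ≤ ·)) :
    (((x :: t).count x : Int)) = 1 + (t.takeWhile (· == x)).length := by
  have hd := pv_dropWhile_gt x t hs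
  have hsplit : t = t.takeWhile (· == x) ++ t.dropWhile (· == x) := (List.takeWhile_append_dropWhile).symm
  have hw : (t.takeWhile (· == x)).count x = (t.takeWhile (· == x)).length := by
    apply List.count_eq_length.mpr
    intro y hy
    have := List.mem_takeWhile_imp hy
    simp at this; simp [this]
  have hdz : (t.dropWhile (· == x)).count x = 0 := by
    apply List.count_eq_zero.mpr
    intro hmem
    exact absurd rfl (ne_of_lt (hd x hmem)).symm
  rw [List.count_cons_self]
  conv_lhs => rw [hsplit]
  rw [List.count_append, hw, hdz]
  push_cast; ring

-- counts of later group keys are untouched by dropping the head's run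
theorem pv_count_mem_drop (x : String) (t : List String) (hs : (x :: t).Pairwise (· ≤ ·))
    (y : String) (hy : y ∈ t.dropWhile (· == x)) :
    (x :: t).count y = (t.dropWhile (· == x)).count y := by
  have hxy := pv_dropWhile_gt x t hs y hy
  have hyx : y ≠ x := (ne_of_lt hxy).symm
  have hsplit : t = t.takeWhile (· == x) ++ t.dropWhile (· == x) := (List.takeWhile_append_dropWhile).symm
  have hwz : (t.takeWhile (· == x)).count y = 0 := by
    apply List.count_eq_zero.mpr
    intro hmem
    have := List.mem_takeWhile_imp hmem
    simp at this; exact hyx this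
  rw [List.count_cons, if_neg (by simp [Ne.symm hyx])]
  conv_lhs => rw [hsplit]
  rw [List.count_append, hwz]; ring

theorem pv_pairwise_drop (x : String) (t : List String) (hs : (x :: t).Pairwise (· ≤ ·)) :
    (t.dropWhile (· == x)).Pairwise (· ≤ ·) :=
  (List.Pairwise.sublist (List.dropWhile_sublist _) ((List.pairwise_cons.mp hs).2))

-- A's scan finds nothing iff no element qualifies
theorem pvFirst_none (nw : Int) (ls : List String) (hs : ls.Pairwise (· ≤ ·))
    (h : pvFirst nw (pvGroups ls) = none) : ∀ y ∈ ls, ¬ pvP ls nw y := by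
  induction ls using pvGroups.induct with
  | case1 => simp
  | case2 x t ih =>
    rw [pvGroups] at h
    rw [pvFirst] at h
    split_ifs at h with hc
    have hcx : ¬ (10 * ((x :: t).count x : Int) ≥ 7 * nw ∧ PySem.Str.len x ≤ 3) := by
      rw [pv_count_head_sorted x t hs]; exact hc
    intro y hy hp
    have hsplit : t = t.takeWhile (· == x) ++ t.dropWhile (· == x) := (List.takeWhile_append_dropWhile).symm
    rcases List.mem_cons.mp hy with rfl | hyt
    · exact hcx hp
    · rw [hsplit] at hyt
      rcases List.mem_append.mp hyt with hw | hd
      · have := List.mem_takeWhile_imp hw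
        simp at this; subst this; exact hcx hp
      · have hcnt := pv_count_mem_drop x t hs y hd
        refine ih (pv_pairwise_drop x t hs) h y hd ⟨?_, hp.2⟩
        rw [← hcnt]; exact hp.1

-- A's scan returns the least qualifying element
theorem pvFirst_some (nw : Int) (ls : List String) (hs : ls.Pairwise (· ≤ ·)) (k : String)
    (h : pvFirst nw (pvGroups ls) = some k) :
    k ∈ ls ∧ pvP ls nw k ∧ ∀ y ∈ ls, pvP ls nw y → k ≤ y := by
  induction ls using pvGroups.induct with
  | case1 => simp [pvGroups, pvFirst] at h
  | case2 x t ih =>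
    rw [pvGroups] at h
    rw [pvFirst] at h
    have hsplit : t = t.takeWhile (· == x) ++ t.dropWhile (· == x) := (List.takeWhile_append_dropWhile).symm
    split_ifs at h with hc
    · -- the head's group qualifies: k = x, the least element of the sorted list
      injection h with h; subst h
      refine ⟨by simp, ⟨by rw [pv_count_head_sorted x t hs]; exact hc.1, hc.2⟩, ?_⟩
      intro y hy _
      rcases List.mem_cons.mp hy with rfl | hyt
      · exact le_refl y
      · exact (List.pairwise_cons.mp hs).1 y hyt
    · -- recurse past the head's run
      obtain ⟨hmem, hp, hmin⟩ := ih (pv_pairwise_drop x t hs) h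
      have hcnt := pv_count_mem_drop x t hs k hmem
      have hkt : k ∈ x :: t := by
        rw [hsplit]
        exact List.mem_cons.mpr (Or.inr (List.mem_append.mpr (Or.inr hmem)))
      refine ⟨hkt, ⟨by rw [hcnt]; exact hp.1, hp.2⟩, ?_⟩
      intro y hy hpy
      have hcx : ¬ (10 * ((x :: t).count x : Int) ≥ 7 * nw ∧ PySem.Str.len x ≤ 3) := by
        rw [pv_count_head_sorted x t hs]; exact hc
      rcases List.mem_cons.mp hy with rfl | hyt
      · exact absurd hpy hcx
      · rw [hsplit] at hyt
        rcases List.mem_append.mp hyt with hw | hd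
        · have := List.mem_takeWhile_imp hw
          simp at this; subst this; exact absurd hpy hcx
        · refine hmin y hd ⟨?_, hpy.2⟩
          rw [← pv_count_mem_drop x t hs y hd]; exact hpy.1

-- B's candidate list is exactly { k ∈ items | pvP items nw k }
theorem pv_mem_candB (items : List String) (nw : Int) (k : String) :
    k ∈ (((items.foldl (fun d x => d.insert x (d.getD x 0 + 1)) (PySem.Dict.empty : PySem.Dict String Int)).items.filter
        (fun kv => PySem.Str.len kv.1 ≤ 3 && 10 * kv.2 ≥ 7 * nw)).map (·.1)) ↔
      k ∈ items ∧ pvP items nw k := by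
  rw [PySem.Dict.foldl_insert_getD_add_one_eq_counter]
  unfold pvP
  simp [PySem.Dict.items_counter, List.mem_filter, List.mem_map, PySem.Set.mem_ofList]
  tauto

theorem pv_main (items : List String) : get_common_word items = get_common_word_alt items := by
  unfold get_common_word get_common_word_alt
  simp only []
  by_cases hlt : (items.length : Int) < 3
  · simp [hlt]
  · rw [if_neg hlt, if_neg hlt]
    have hs : (PySem.List.sorted items (fun x => x) false).Pairwise (· ≤ ·) :=
      PySem.List.sorted_pairwise items (fun x => x)
    have hperm : (PySem.List.sorted items (fun x => x) false).Perm items :=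
      PySem.List.sorted_perm items (fun x => x) false
    have hcnt : ∀ y, (PySem.List.sorted items (fun x => x) false).count y = items.count y :=
      fun y => hperm.count_eq y
    have hmemls : ∀ y, y ∈ PySem.List.sorted items (fun x => x) false ↔ y ∈ items :=
      fun y => hperm.mem_iff
    set nw : Int := (items.length : Int) with hnw
    cases hA : pvFirst nw (pvGroups (PySem.List.sorted items (fun x => x) false)) with
    | none =>
      have hno := pvFirst_none nw _ hs hA
      cases hB : PySem.List.min? (((items.foldl (fun d x => d.insert x (d.getD x 0 + 1)) (PySem.Dict.empty : PySem.Dict String Int)).items.filter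
          (fun kv => PySem.Str.len kv.1 ≤ 3 && 10 * kv.2 ≥ 7 * nw)).map (·.1)) (fun x => x) with
      | none => rfl
      | some m =>
        exfalso
        have hm := PySem.List.min?_mem hB
        rw [pv_mem_candB items nw m] at hm
        refine hno m ((hmemls m).mpr hm.1) ⟨?_, hm.2.2⟩
        rw [hcnt m]; exact hm.2.1
    | some k =>
      obtain ⟨hkmem, hkp, hkmin⟩ := pvFirst_some nw _ hs k hA
      have hkcand : k ∈ (((items.foldl (fun d x => d.insert x (d.getD x 0 + 1)) (PySem.Dict.empty : PySem.Dict String Int)).items.filter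
          (fun kv => PySem.Str.len kv.1 ≤ 3 && 10 * kv.2 ≥ 7 * nw)).map (·.1)) := by
        rw [pv_mem_candB items nw k]
        exact ⟨(hmemls k).mp hkmem, by rw [← hcnt k]; exact hkp.1, hkp.2⟩
      cases hB : PySem.List.min? (((items.foldl (fun d x => d.insert x (d.getD x 0 + 1)) (PySem.Dict.empty : PySem.Dict String Int)).items.filter
          (fun kv => PySem.Str.len kv.1 ≤ 3 && 10 * kv.2 ≥ 7 * nw)).map (·.1)) (fun x => x) with
      | none =>
        exfalso
        rw [PySem.List.min?_eq_none_iff] at hB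
        rw [hB] at hkcand
        exact absurd hkcand (List.not_mem_nil)
      | some m =>
        have hm := PySem.List.min?_mem hB
        have hmk : m ≤ k := PySem.List.min?_isMin hB k hkcand
        rw [pv_mem_candB items nw m] at hm
        have hkm : k ≤ m := by
          refine hkmin m ((hmemls m).mpr hm.1) ⟨?_, hm.2.2⟩
          rw [hcnt m]; exact hm.2.1
        rw [le_antisymm hkm hmk]

-- ===== VERDICT (by name: the statement is the Claim_ definition above) =====
theorem get_common_word_spec : Claim_equal_get_common_word := by
  intro items _
  unfold Spec_get_common_word
  exact pv_main items
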